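-- pv_equiv track=rewrite | github.com/ongyiumark/programming-problems | Atcoder/ABCs/001 - 099/ABC001/ABC001C.py | convert_dis
-- ===== SOURCE A (Python) =====
-- speed_range = [0, 3, 16, 34, 55, 80, 108, 139, 172, 208, 245, 285, 327]
--
-- def convert_dis(dis):
--     speed = dis//6 + int(dis%6 >= 3)
--     lo = 0
--     hi = len(speed_range)-1
--     ans = 0
--     while lo <= hi:
--         mid = hi - (hi-lo)//2
--         if speed >= speed_range[mid]:
--             ans = mid
--             lo = mid+1
--         else:
--             hi = mid-1
--     return ans
-- ===== SOURCE B (Python) =====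
-- speed_range = [0, 3, 16, 34, 55, 80, 108, 139, 172, 208, 245, 285, 327]
--
-- def convert_dis(dis):
--     speed = dis//6 + int(dis%6 >= 3)
--     ans = 0
--     for i, s in enumerate(speed_range):
--         if speed >= s:
--             ans = i
--     return ans
-- ===== Notes on version B (the rewrite author's own statement) =====
-- stated objective: simpler
-- what changed: Replaced the hand-written binary search over the fixed threshold table with a single linear scan that keeps the last index whose threshold the speed reaches.
import Mathlib
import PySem

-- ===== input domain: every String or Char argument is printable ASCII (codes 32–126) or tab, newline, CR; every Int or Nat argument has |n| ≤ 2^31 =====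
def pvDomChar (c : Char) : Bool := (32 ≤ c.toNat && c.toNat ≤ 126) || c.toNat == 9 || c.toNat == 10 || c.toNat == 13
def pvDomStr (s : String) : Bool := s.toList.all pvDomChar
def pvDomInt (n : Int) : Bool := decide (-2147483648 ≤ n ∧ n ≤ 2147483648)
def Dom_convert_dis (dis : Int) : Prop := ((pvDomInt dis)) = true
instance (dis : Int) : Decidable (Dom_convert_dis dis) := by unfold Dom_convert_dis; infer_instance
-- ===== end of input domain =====

-- B replaces A's binary search over the fixed table with a single linear scan keeping the last qualifying index (simpler).
-- ===== PORT A =====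
def speedRange : List Int := [0, 3, 16, 34, 55, 80, 108, 139, 172, 208, 245, 285, 327]

-- the while loop of A; fuel only makes the recursion total (more than enough iterations for the fixed table)
def convertLoop (fuel : Nat) (speed lo hi ans : Int) : Int :=
  match fuel with
  | 0 => ans
  | fuel + 1 =>
    if lo ≤ hi then
      let mid := hi - PySem.Int.floordiv (hi - lo) 2
      match PySem.List.pyGet? speedRange mid with
      | some v =>
        if speed ≥ v then convertLoop fuel speed (mid + 1) hi mid
        else convertLoop fuel speed lo (mid - 1) ans
      | none => ans   -- IndexError; never reached since 0 ≤ lo ≤ mid ≤ hi ≤ 12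
    else ans

def convert_dis (dis : Int) : Int :=
  let speed := PySem.Int.floordiv dis 6 + (if PySem.Int.mod dis 6 ≥ 3 then 1 else 0)
  convertLoop 20 speed 0 ((speedRange.length : Int) - 1) 0

-- ===== PORT B =====
def convert_dis_alt (dis : Int) : Int :=
  let speed := PySem.Int.floordiv dis 6 + (if PySem.Int.mod dis 6 ≥ 3 then 1 else 0)
  (PySem.List.enumerate speedRange).foldl (fun ans p => if speed ≥ p.2 then p.1 else ans) 0

-- ===== PRECONDITION & SPEC =====
def Spec_convert_dis (dis : Int) (out : Int) : Prop := out = convert_dis_alt dis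
instance (dis : Int) (out : Int) : Decidable (Spec_convert_dis dis out) := by unfold Spec_convert_dis; infer_instance

-- ===== CLAIM (what is proved, stated in full; the proofs are below) =====
def Claim_equal_convert_dis : Prop := ∀ (dis : Int), Dom_convert_dis dis → Spec_convert_dis dis (convert_dis dis)

-- ===== LEMMAS AND PROOFS =====
-- termination of the while loop once lo > hi (any fuel)
lemma pvLeaf (f : Nat) (speed lo hi ans : Int) (h : hi < lo) :
    convertLoop f speed lo hi ans = ans := by
  cases f with
  | zero => rfl
  | succ n => simp only [convertLoop, if_neg (by omega : ¬ lo ≤ hi)]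

-- one iteration of the while loop, conditions supplied as hypotheses
lemma pvStep (fuel : Nat) (speed lo hi ans mid v : Int)
    (hle : lo ≤ hi) (hmid : hi - PySem.Int.floordiv (hi - lo) 2 = mid)
    (hget : PySem.List.pyGet? speedRange mid = some v) :
    convertLoop (fuel + 1) speed lo hi ans =
      if speed ≥ v then convertLoop fuel speed (mid + 1) hi mid
      else convertLoop fuel speed lo (mid - 1) ans := by
  simp only [convertLoop, if_pos hle, hmid, hget]

lemma pvN_11_11 (f : Nat) (speed ans : Int) :
    convertLoop (f + 1) speed 11 11 ans = (if speed ≥ (285:Int) then 11 else ans) := by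
  rw [pvStep f speed 11 11 ans 11 285 (by decide) (by decide) (by decide)]
  by_cases hv : speed ≥ (285:Int)
  · simp only [if_pos hv]
    exact pvLeaf _ _ _ _ _ (by decide)
  · simp only [if_neg hv]
    exact pvLeaf _ _ _ _ _ (by decide)

lemma pvN_9_9 (f : Nat) (speed ans : Int) :
    convertLoop (f + 1) speed 9 9 ans = (if speed ≥ (208:Int) then 9 else ans) := by
  rw [pvStep f speed 9 9 ans 9 208 (by decide) (by decide) (by decide)]
  by_cases hv : speed ≥ (208:Int)
  · simp only [if_pos hv]
    exact pvLeaf _ _ _ _ _ (by decide)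
  · simp only [if_neg hv]
    exact pvLeaf _ _ _ _ _ (by decide)

lemma pvN_7_7 (f : Nat) (speed ans : Int) :
    convertLoop (f + 1) speed 7 7 ans = (if speed ≥ (139:Int) then 7 else ans) := by
  rw [pvStep f speed 7 7 ans 7 139 (by decide) (by decide) (by decide)]
  by_cases hv : speed ≥ (139:Int)
  · simp only [if_pos hv]
    exact pvLeaf _ _ _ _ _ (by decide)
  · simp only [if_neg hv]
    exact pvLeaf _ _ _ _ _ (by decide)

lemma pvN_4_4 (f : Nat) (speed ans : Int) :
    convertLoop (f + 1) speed 4 4 ans = (if speed ≥ (55:Int) then 4 else ans) := by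
  rw [pvStep f speed 4 4 ans 4 55 (by decide) (by decide) (by decide)]
  by_cases hv : speed ≥ (55:Int)
  · simp only [if_pos hv]
    exact pvLeaf _ _ _ _ _ (by decide)
  · simp only [if_neg hv]
    exact pvLeaf _ _ _ _ _ (by decide)

lemma pvN_2_2 (f : Nat) (speed ans : Int) :
    convertLoop (f + 1) speed 2 2 ans = (if speed ≥ (16:Int) then 2 else ans) := by
  rw [pvStep f speed 2 2 ans 2 16 (by decide) (by decide) (by decide)]
  by_cases hv : speed ≥ (16:Int)
  · simp only [if_pos hv]
    exact pvLeaf _ _ _ _ _ (by decide)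
  · simp only [if_neg hv]
    exact pvLeaf _ _ _ _ _ (by decide)

lemma pvN_0_0 (f : Nat) (speed ans : Int) :
    convertLoop (f + 1) speed 0 0 ans = (if speed ≥ (0:Int) then 0 else ans) := by
  rw [pvStep f speed 0 0 ans 0 0 (by decide) (by decide) (by decide)]
  by_cases hv : speed ≥ (0:Int)
  · simp only [if_pos hv]
    exact pvLeaf _ _ _ _ _ (by decide)
  · simp only [if_neg hv]
    exact pvLeaf _ _ _ _ _ (by decide)

lemma pvN_11_12 (f : Nat) (speed ans : Int) :
    convertLoop (f + 2) speed 11 12 ans = (if speed ≥ (327:Int) then 12 else (if speed ≥ (285:Int) then 11 else ans)) := by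
  rw [(by omega : f + 2 = (f + 1) + 1)]
  rw [pvStep (f + 1) speed 11 12 ans 12 327 (by decide) (by decide) (by decide)]
  by_cases hv : speed ≥ (327:Int)
  · simp only [if_pos hv]
    exact pvLeaf _ _ _ _ _ (by decide)
  · simp only [if_neg hv]
    exact pvN_11_11 f speed ans

lemma pvN_7_9 (f : Nat) (speed ans : Int) :
    convertLoop (f + 2) speed 7 9 ans = (if speed ≥ (172:Int) then (if speed ≥ (208:Int) then 9 else 8) else (if speed ≥ (139:Int) then 7 else ans)) := by
  rw [(by omega : f + 2 = (f + 1) + 1)]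
  rw [pvStep (f + 1) speed 7 9 ans 8 172 (by decide) (by decide) (by decide)]
  by_cases hv : speed ≥ (172:Int)
  · simp only [if_pos hv]
    exact pvN_9_9 f speed 8
  · simp only [if_neg hv]
    exact pvN_7_7 f speed ans

lemma pvN_4_5 (f : Nat) (speed ans : Int) :
    convertLoop (f + 2) speed 4 5 ans = (if speed ≥ (80:Int) then 5 else (if speed ≥ (55:Int) then 4 else ans)) := by
  rw [(by omega : f + 2 = (f + 1) + 1)]
  rw [pvStep (f + 1) speed 4 5 ans 5 80 (by decide) (by decide) (by decide)]
  by_cases hv : speed ≥ (80:Int)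
  · simp only [if_pos hv]
    exact pvLeaf _ _ _ _ _ (by decide)
  · simp only [if_neg hv]
    exact pvN_4_4 f speed ans

lemma pvN_0_2 (f : Nat) (speed ans : Int) :
    convertLoop (f + 2) speed 0 2 ans = (if speed ≥ (3:Int) then (if speed ≥ (16:Int) then 2 else 1) else (if speed ≥ (0:Int) then 0 else ans)) := by
  rw [(by omega : f + 2 = (f + 1) + 1)]
  rw [pvStep (f + 1) speed 0 2 ans 1 3 (by decide) (by decide) (by decide)]
  by_cases hv : speed ≥ (3:Int)
  · simp only [if_pos hv]
    exact pvN_2_2 f speed 1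
  · simp only [if_neg hv]
    exact pvN_0_0 f speed ans

lemma pvN_7_12 (f : Nat) (speed ans : Int) :
    convertLoop (f + 3) speed 7 12 ans = (if speed ≥ (245:Int) then (if speed ≥ (327:Int) then 12 else (if speed ≥ (285:Int) then 11 else 10)) else (if speed ≥ (172:Int) then (if speed ≥ (208:Int) then 9 else 8) else (if speed ≥ (139:Int) then 7 else ans))) := by
  rw [(by omega : f + 3 = (f + 2) + 1)]
  rw [pvStep (f + 2) speed 7 12 ans 10 245 (by decide) (by decide) (by decide)]
  by_cases hv : speed ≥ (245:Int)
  · simp only [if_pos hv]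
    exact pvN_11_12 f speed 10
  · simp only [if_neg hv]
    exact pvN_7_9 f speed ans

lemma pvN_0_5 (f : Nat) (speed ans : Int) :
    convertLoop (f + 3) speed 0 5 ans = (if speed ≥ (34:Int) then (if speed ≥ (80:Int) then 5 else (if speed ≥ (55:Int) then 4 else 3)) else (if speed ≥ (3:Int) then (if speed ≥ (16:Int) then 2 else 1) else (if speed ≥ (0:Int) then 0 else ans))) := by
  rw [(by omega : f + 3 = (f + 2) + 1)]
  rw [pvStep (f + 2) speed 0 5 ans 3 34 (by decide) (by decide) (by decide)]
  by_cases hv : speed ≥ (34:Int)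
  · simp only [if_pos hv]
    exact pvN_4_5 f speed 3
  · simp only [if_neg hv]
    exact pvN_0_2 f speed ans

lemma pvN_0_12 (f : Nat) (speed ans : Int) :
    convertLoop (f + 4) speed 0 12 ans = (if speed ≥ (108:Int) then (if speed ≥ (245:Int) then (if speed ≥ (327:Int) then 12 else (if speed ≥ (285:Int) then 11 else 10)) else (if speed ≥ (172:Int) then (if speed ≥ (208:Int) then 9 else 8) else (if speed ≥ (139:Int) then 7 else 6))) else (if speed ≥ (34:Int) then (if speed ≥ (80:Int) then 5 else (if speed ≥ (55:Int) then 4 else 3)) else (if speed ≥ (3:Int) then (if speed ≥ (16:Int) then 2 else 1) else (if speed ≥ (0:Int) then 0 else ans)))) := by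
  rw [(by omega : f + 4 = (f + 3) + 1)]
  rw [pvStep (f + 3) speed 0 12 ans 6 108 (by decide) (by decide) (by decide)]
  by_cases hv : speed ≥ (108:Int)
  · simp only [if_pos hv]
    exact pvN_7_12 f speed 6
  · simp only [if_neg hv]
    exact pvN_0_5 f speed ans

lemma pvLoopEval (speed : Int) : convertLoop 20 speed 0 12 0 = (if speed ≥ (108:Int) then (if speed ≥ (245:Int) then (if speed ≥ (327:Int) then 12 else (if speed ≥ (285:Int) then 11 else 10)) else (if speed ≥ (172:Int) then (if speed ≥ (208:Int) then 9 else 8) else (if speed ≥ (139:Int) then 7 else 6))) else (if speed ≥ (34:Int) then (if speed ≥ (80:Int) then 5 else (if speed ≥ (55:Int) then 4 else 3)) else (if speed ≥ (3:Int) then (if speed ≥ (16:Int) then 2 else 1) else (if speed ≥ (0:Int) then 0 else (0:Int))))) := by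
  rw [(by norm_num : (20 : Nat) = 16 + 4)]
  exact pvN_0_12 16 speed 0

-- the linear scan of B, evaluated by interval case analysis on speed
lemma pvScanEval (speed : Int) : (PySem.List.enumerate speedRange).foldl (fun ans p => if speed ≥ p.2 then p.1 else ans) 0 = (if speed ≥ (108:Int) then (if speed ≥ (245:Int) then (if speed ≥ (327:Int) then 12 else (if speed ≥ (285:Int) then 11 else 10)) else (if speed ≥ (172:Int) then (if speed ≥ (208:Int) then 9 else 8) else (if speed ≥ (139:Int) then 7 else 6))) else (if speed ≥ (34:Int) then (if speed ≥ (80:Int) then 5 else (if speed ≥ (55:Int) then 4 else 3)) else (if speed ≥ (3:Int) then (if speed ≥ (16:Int) then 2 else 1) else (if speed ≥ (0:Int) then 0 else (0:Int))))) := by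
  rw [(by decide : PySem.List.enumerate speedRange = [(0,(0:Int)),(1,3),(2,16),(3,34),(4,55),(5,80),(6,108),(7,139),(8,172),(9,208),(10,245),(11,285),(12,327)])]
  by_cases c12 : speed ≥ (327:Int)
  · simp only [List.foldl_cons, List.foldl_nil, if_pos (show speed ≥ (0:Int) from by omega), if_pos (show speed ≥ (3:Int) from by omega), if_pos (show speed ≥ (16:Int) from by omega), if_pos (show speed ≥ (34:Int) from by omega), if_pos (show speed ≥ (55:Int) from by omega), if_pos (show speed ≥ (80:Int) from by omega), if_pos (show speed ≥ (108:Int) from by omega), if_pos (show speed ≥ (139:Int) from by omega), if_pos (show speed ≥ (172:Int) from by omega), if_pos (show speed ≥ (208:Int) from by omega), if_pos (show speed ≥ (245:Int) from by omega), if_pos (show speed ≥ (285:Int) from by omega), if_pos (show speed ≥ (327:Int) from by omega)]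
  ·
    by_cases c11 : speed ≥ (285:Int)
    · simp only [List.foldl_cons, List.foldl_nil, if_pos (show speed ≥ (0:Int) from by omega), if_pos (show speed ≥ (3:Int) from by omega), if_pos (show speed ≥ (16:Int) from by omega), if_pos (show speed ≥ (34:Int) from by omega), if_pos (show speed ≥ (55:Int) from by omega), if_pos (show speed ≥ (80:Int) from by omega), if_pos (show speed ≥ (108:Int) from by omega), if_pos (show speed ≥ (139:Int) from by omega), if_pos (show speed ≥ (172:Int) from by omega), if_pos (show speed ≥ (208:Int) from by omega), if_pos (show speed ≥ (245:Int) from by omega), if_pos (show speed ≥ (285:Int) from by omega), if_neg (show ¬ speed ≥ (327:Int) from by omega)]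
    ·
      by_cases c10 : speed ≥ (245:Int)
      · simp only [List.foldl_cons, List.foldl_nil, if_pos (show speed ≥ (0:Int) from by omega), if_pos (show speed ≥ (3:Int) from by omega), if_pos (show speed ≥ (16:Int) from by omega), if_pos (show speed ≥ (34:Int) from by omega), if_pos (show speed ≥ (55:Int) from by omega), if_pos (show speed ≥ (80:Int) from by omega), if_pos (show speed ≥ (108:Int) from by omega), if_pos (show speed ≥ (139:Int) from by omega), if_pos (show speed ≥ (172:Int) from by omega), if_pos (show speed ≥ (208:Int) from by omega), if_pos (show speed ≥ (245:Int) from by omega), if_neg (show ¬ speed ≥ (285:Int) from by omega), if_neg (show ¬ speed ≥ (327:Int) from by omega)]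
      ·
        by_cases c9 : speed ≥ (208:Int)
        · simp only [List.foldl_cons, List.foldl_nil, if_pos (show speed ≥ (0:Int) from by omega), if_pos (show speed ≥ (3:Int) from by omega), if_pos (show speed ≥ (16:Int) from by omega), if_pos (show speed ≥ (34:Int) from by omega), if_pos (show speed ≥ (55:Int) from by omega), if_pos (show speed ≥ (80:Int) from by omega), if_pos (show speed ≥ (108:Int) from by omega), if_pos (show speed ≥ (139:Int) from by omega), if_pos (show speed ≥ (172:Int) from by omega), if_pos (show speed ≥ (208:Int) from by omega), if_neg (show ¬ speed ≥ (245:Int) from by omega), if_neg (show ¬ speed ≥ (285:Int) from by omega), if_neg (show ¬ speed ≥ (327:Int) from by omega)]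
        ·
          by_cases c8 : speed ≥ (172:Int)
          · simp only [List.foldl_cons, List.foldl_nil, if_pos (show speed ≥ (0:Int) from by omega), if_pos (show speed ≥ (3:Int) from by omega), if_pos (show speed ≥ (16:Int) from by omega), if_pos (show speed ≥ (34:Int) from by omega), if_pos (show speed ≥ (55:Int) from by omega), if_pos (show speed ≥ (80:Int) from by omega), if_pos (show speed ≥ (108:Int) from by omega), if_pos (show speed ≥ (139:Int) from by omega), if_pos (show speed ≥ (172:Int) from by omega), if_neg (show ¬ speed ≥ (208:Int) from by omega), if_neg (show ¬ speed ≥ (245:Int) from by omega), if_neg (show ¬ speed ≥ (285:Int) from by omega), if_neg (show ¬ speed ≥ (327:Int) from by omega)]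
          ·
            by_cases c7 : speed ≥ (139:Int)
            · simp only [List.foldl_cons, List.foldl_nil, if_pos (show speed ≥ (0:Int) from by omega), if_pos (show speed ≥ (3:Int) from by omega), if_pos (show speed ≥ (16:Int) from by omega), if_pos (show speed ≥ (34:Int) from by omega), if_pos (show speed ≥ (55:Int) from by omega), if_pos (show speed ≥ (80:Int) from by omega), if_pos (show speed ≥ (108:Int) from by omega), if_pos (show speed ≥ (139:Int) from by omega), if_neg (show ¬ speed ≥ (172:Int) from by omega), if_neg (show ¬ speed ≥ (208:Int) from by omega), if_neg (show ¬ speed ≥ (245:Int) from by omega), if_neg (show ¬ speed ≥ (285:Int) from by omega), if_neg (show ¬ speed ≥ (327:Int) from by omega)]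
            ·
              by_cases c6 : speed ≥ (108:Int)
              · simp only [List.foldl_cons, List.foldl_nil, if_pos (show speed ≥ (0:Int) from by omega), if_pos (show speed ≥ (3:Int) from by omega), if_pos (show speed ≥ (16:Int) from by omega), if_pos (show speed ≥ (34:Int) from by omega), if_pos (show speed ≥ (55:Int) from by omega), if_pos (show speed ≥ (80:Int) from by omega), if_pos (show speed ≥ (108:Int) from by omega), if_neg (show ¬ speed ≥ (139:Int) from by omega), if_neg (show ¬ speed ≥ (172:Int) from by omega), if_neg (show ¬ speed ≥ (208:Int) from by omega), if_neg (show ¬ speed ≥ (245:Int) from by omega), if_neg (show ¬ speed ≥ (285:Int) from by omega), if_neg (show ¬ speed ≥ (327:Int) from by omega)]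
              ·
                by_cases c5 : speed ≥ (80:Int)
                · simp only [List.foldl_cons, List.foldl_nil, if_pos (show speed ≥ (0:Int) from by omega), if_pos (show speed ≥ (3:Int) from by omega), if_pos (show speed ≥ (16:Int) from by omega), if_pos (show speed ≥ (34:Int) from by omega), if_pos (show speed ≥ (55:Int) from by omega), if_pos (show speed ≥ (80:Int) from by omega), if_neg (show ¬ speed ≥ (108:Int) from by omega), if_neg (show ¬ speed ≥ (139:Int) from by omega), if_neg (show ¬ speed ≥ (172:Int) from by omega), if_neg (show ¬ speed ≥ (208:Int) from by omega), if_neg (show ¬ speed ≥ (245:Int) from by omega), if_neg (show ¬ speed ≥ (285:Int) from by omega), if_neg (show ¬ speed ≥ (327:Int) from by omega)]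
                ·
                  by_cases c4 : speed ≥ (55:Int)
                  · simp only [List.foldl_cons, List.foldl_nil, if_pos (show speed ≥ (0:Int) from by omega), if_pos (show speed ≥ (3:Int) from by omega), if_pos (show speed ≥ (16:Int) from by omega), if_pos (show speed ≥ (34:Int) from by omega), if_pos (show speed ≥ (55:Int) from by omega), if_neg (show ¬ speed ≥ (80:Int) from by omega), if_neg (show ¬ speed ≥ (108:Int) from by omega), if_neg (show ¬ speed ≥ (139:Int) from by omega), if_neg (show ¬ speed ≥ (172:Int) from by omega), if_neg (show ¬ speed ≥ (208:Int) from by omega), if_neg (show ¬ speed ≥ (245:Int) from by omega), if_neg (show ¬ speed ≥ (285:Int) from by omega), if_neg (show ¬ speed ≥ (327:Int) from by omega)]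
                  ·
                    by_cases c3 : speed ≥ (34:Int)
                    · simp only [List.foldl_cons, List.foldl_nil, if_pos (show speed ≥ (0:Int) from by omega), if_pos (show speed ≥ (3:Int) from by omega), if_pos (show speed ≥ (16:Int) from by omega), if_pos (show speed ≥ (34:Int) from by omega), if_neg (show ¬ speed ≥ (55:Int) from by omega), if_neg (show ¬ speed ≥ (80:Int) from by omega), if_neg (show ¬ speed ≥ (108:Int) from by omega), if_neg (show ¬ speed ≥ (139:Int) from by omega), if_neg (show ¬ speed ≥ (172:Int) from by omega), if_neg (show ¬ speed ≥ (208:Int) from by omega), if_neg (show ¬ speed ≥ (245:Int) from by omega), if_neg (show ¬ speed ≥ (285:Int) from by omega), if_neg (show ¬ speed ≥ (327:Int) from by omega)]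
                    ·
                      by_cases c2 : speed ≥ (16:Int)
                      · simp only [List.foldl_cons, List.foldl_nil, if_pos (show speed ≥ (0:Int) from by omega), if_pos (show speed ≥ (3:Int) from by omega), if_pos (show speed ≥ (16:Int) from by omega), if_neg (show ¬ speed ≥ (34:Int) from by omega), if_neg (show ¬ speed ≥ (55:Int) from by omega), if_neg (show ¬ speed ≥ (80:Int) from by omega), if_neg (show ¬ speed ≥ (108:Int) from by omega), if_neg (show ¬ speed ≥ (139:Int) from by omega), if_neg (show ¬ speed ≥ (172:Int) from by omega), if_neg (show ¬ speed ≥ (208:Int) from by omega), if_neg (show ¬ speed ≥ (245:Int) from by omega), if_neg (show ¬ speed ≥ (285:Int) from by omega), if_neg (show ¬ speed ≥ (327:Int) from by omega)]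
                      ·
                        by_cases c1 : speed ≥ (3:Int)
                        · simp only [List.foldl_cons, List.foldl_nil, if_pos (show speed ≥ (0:Int) from by omega), if_pos (show speed ≥ (3:Int) from by omega), if_neg (show ¬ speed ≥ (16:Int) from by omega), if_neg (show ¬ speed ≥ (34:Int) from by omega), if_neg (show ¬ speed ≥ (55:Int) from by omega), if_neg (show ¬ speed ≥ (80:Int) from by omega), if_neg (show ¬ speed ≥ (108:Int) from by omega), if_neg (show ¬ speed ≥ (139:Int) from by omega), if_neg (show ¬ speed ≥ (172:Int) from by omega), if_neg (show ¬ speed ≥ (208:Int) from by omega), if_neg (show ¬ speed ≥ (245:Int) from by omega), if_neg (show ¬ speed ≥ (285:Int) from by omega), if_neg (show ¬ speed ≥ (327:Int) from by omega)]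
                        ·
                          by_cases c0 : speed ≥ (0:Int)
                          · simp only [List.foldl_cons, List.foldl_nil, if_pos (show speed ≥ (0:Int) from by omega), if_neg (show ¬ speed ≥ (3:Int) from by omega), if_neg (show ¬ speed ≥ (16:Int) from by omega), if_neg (show ¬ speed ≥ (34:Int) from by omega), if_neg (show ¬ speed ≥ (55:Int) from by omega), if_neg (show ¬ speed ≥ (80:Int) from by omega), if_neg (show ¬ speed ≥ (108:Int) from by omega), if_neg (show ¬ speed ≥ (139:Int) from by omega), if_neg (show ¬ speed ≥ (172:Int) from by omega), if_neg (show ¬ speed ≥ (208:Int) from by omega), if_neg (show ¬ speed ≥ (245:Int) from by omega), if_neg (show ¬ speed ≥ (285:Int) from by omega), if_neg (show ¬ speed ≥ (327:Int) from by omega)]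
                          ·
                            simp only [List.foldl_cons, List.foldl_nil, if_neg (show ¬ speed ≥ (0:Int) from by omega), if_neg (show ¬ speed ≥ (3:Int) from by omega), if_neg (show ¬ speed ≥ (16:Int) from by omega), if_neg (show ¬ speed ≥ (34:Int) from by omega), if_neg (show ¬ speed ≥ (55:Int) from by omega), if_neg (show ¬ speed ≥ (80:Int) from by omega), if_neg (show ¬ speed ≥ (108:Int) from by omega), if_neg (show ¬ speed ≥ (139:Int) from by omega), if_neg (show ¬ speed ≥ (172:Int) from by omega), if_neg (show ¬ speed ≥ (208:Int) from by omega), if_neg (show ¬ speed ≥ (245:Int) from by omega), if_neg (show ¬ speed ≥ (285:Int) from by omega), if_neg (show ¬ speed ≥ (327:Int) from by omega)]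

-- ===== VERDICT (by name: the statement is the Claim_ definition above) =====
set_option maxHeartbeats 1000000 in
theorem convert_dis_spec : Claim_equal_convert_dis := by
  intro dis _
  unfold Spec_convert_dis
  simp only [convert_dis, convert_dis_alt]
  generalize (PySem.Int.floordiv dis 6 + (if PySem.Int.mod dis 6 ≥ 3 then 1 else 0)) = speed
  rw [(by decide : ((speedRange.length : Int) - 1) = 12), pvLoopEval speed, pvScanEval speed]
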